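-- pv_equiv track=rewrite | github.com/HyeongSikkk/coding_test | programmers/161988/161988.py | solution
-- ===== SOURCE A (Python) =====
-- def solution(sequence) :
--     def calc(length, array) :
--         results = []
--         for start_idx in range(0, len(array) -length+1) :
--             purse = array[start_idx:start_idx+length]
--             plus, minus = 0, 0
--             for idx,num in enumerate(purse) :
--                 plus += ((-1)**(idx))*num
--                 minus += ((-1)**(idx+1))*num
--             results.append(plus if plus > minus else minus)
--         value = max(results)
--         return value
--
--
--     n = len(sequence)
--     max_value = 0
--     for i in range(1, n+1) :
--         value = calc(i, sequence)
--         if max_value < value :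
--             max_value = value
--     return max_value
-- ===== SOURCE B (Python) =====
-- def solution(sequence):
--     # One pass: prefix sums of the alternating-signed sequence; the answer is
--     # max prefix sum minus min prefix sum (both include the empty prefix 0).
--     s = 0
--     mx = 0
--     mn = 0
--     sign = 1
--     for x in sequence:
--         s += sign * x
--         mx = max(mx, s)
--         mn = min(mn, s)
--         sign = -sign
--     return mx - mn
-- ===== Notes on version B (the rewrite author's own statement) =====
-- stated objective: faster
-- what changed: Replaced A's triple loop over every (length, start) window with alternating sums recomputed per window by a single pass maintaining the running alternating-signed prefix sum and its max and min, returning max minus min.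
import Mathlib
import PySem

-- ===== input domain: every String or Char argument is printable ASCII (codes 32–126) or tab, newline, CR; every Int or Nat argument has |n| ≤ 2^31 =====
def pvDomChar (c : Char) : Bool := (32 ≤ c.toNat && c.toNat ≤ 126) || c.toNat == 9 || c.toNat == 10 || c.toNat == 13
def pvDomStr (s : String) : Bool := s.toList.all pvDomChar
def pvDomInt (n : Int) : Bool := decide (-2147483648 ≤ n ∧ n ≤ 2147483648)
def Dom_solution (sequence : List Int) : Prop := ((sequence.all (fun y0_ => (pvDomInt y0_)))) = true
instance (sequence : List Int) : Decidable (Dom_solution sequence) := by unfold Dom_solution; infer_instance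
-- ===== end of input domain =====

-- B replaces A's cubic scan over all (length, start) windows by one pass over
-- the prefix sums of the alternating-signed sequence (objective: faster).

-- ===== PORT A =====
-- inner helper 'calc(length, array)' of A.  '(-1)**idx' is ported as
-- '(-1)^idx.toNat' — exact, since enumerate indices are ≥ 0.
def solutionCalc (length : Int) (array : List Int) : Int :=
  let results := (PySem.List.pyRange 0 (PySem.List.len array - length + 1) 1).foldl
    (fun results start_idx =>
      let purse := PySem.List.slice array (some start_idx) (some (start_idx + length))
      let pm := (PySem.List.enumerate purse 0).foldl
        (fun (pm : Int × Int) (p : Int × Int) =>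
          (pm.1 + (-1) ^ p.1.toNat * p.2, pm.2 + (-1) ^ (p.1 + 1).toNat * p.2))
        (0, 0)
      results ++ [if pm.1 > pm.2 then pm.1 else pm.2])
    []
  -- Python 'max(results)' raises on []; unreachable from 'solution' (the range is nonempty there)
  ((PySem.List.max? results (fun y => y)).getD 0)

def solution (sequence : List Int) : Int :=
  let n := PySem.List.len sequence
  (PySem.List.pyRange 1 (n + 1) 1).foldl
    (fun max_value i =>
      let value := solutionCalc i sequence
      if max_value < value then value else max_value)
    0

-- ===== PORT B =====
-- state (s, mx, mn, sign): running alternating prefix sum, its max, its min, next sign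
def solution_alt (sequence : List Int) : Int :=
  let r := sequence.foldl
    (fun (st : Int × Int × Int × Int) x =>
      let s := st.1 + st.2.2.2 * x
      (s, max st.2.1 s, min st.2.2.1 s, -st.2.2.2))
    (0, 0, 0, 1)
  r.2.1 - r.2.2.1

-- ===== PRECONDITION & SPEC =====
def Spec_solution (sequence : List Int) (out : Int) : Prop := out = solution_alt sequence
instance (sequence : List Int) (out : Int) : Decidable (Spec_solution sequence out) := by unfold Spec_solution; infer_instance

-- ===== CLAIM (what is proved, stated in full; the proofs are below) =====
def Claim_equal_solution : Prop := ∀ (sequence : List Int), Dom_solution sequence → Spec_solution sequence (solution sequence)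

-- ===== LEMMAS AND PROOFS =====

-- the alternating-signed copy of a list: msign sg [x0,x1,…] = [sg*x0, -sg*x1, …]
def msign (sg : Int) : List Int → List Int
  | [] => []
  | x :: xs => sg * x :: msign (-sg) xs

-- alternating sum: asum [x0,x1,x2,…] = x0 - x1 + x2 - …
def asum : List Int → Int
  | [] => 0
  | x :: xs => x - asum xs

-- max / min over all prefix sums of l started at s (the empty prefix included)
def PMX (s : Int) : List Int → Int
  | [] => s
  | x :: xs => max s (PMX (s + x) xs)

def PMN (s : Int) : List Int → Int
  | [] => s
  | x :: xs => min s (PMN (s + x) xs)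

theorem le_PMX (l : List Int) : ∀ s : Int, s ≤ PMX s l := by
  induction l with
  | nil => intro s; simp [PMX]
  | cons x xs ih => intro s; simp [PMX]

theorem PMN_le (l : List Int) : ∀ s : Int, PMN s l ≤ s := by
  induction l with
  | nil => intro s; simp [PMN]
  | cons x xs ih => intro s; simp [PMN]

theorem prefix_le_PMX (l : List Int) : ∀ (s : Int) (k : Nat), s + (l.take k).sum ≤ PMX s l := by
  induction l with
  | nil => intro s k; simp [PMX]
  | cons x xs ih =>
    intro s k
    cases k with
    | zero => simp [PMX]
    | succ k =>
      simp only [PMX, List.take_succ_cons, List.sum_cons]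
      have h1 := ih (s + x) k
      have h2 := le_max_right s (PMX (s + x) xs)
      linarith

theorem PMN_le_prefix (l : List Int) : ∀ (s : Int) (k : Nat), PMN s l ≤ s + (l.take k).sum := by
  induction l with
  | nil => intro s k; simp [PMN]
  | cons x xs ih =>
    intro s k
    cases k with
    | zero => simp [PMN]
    | succ k =>
      simp only [PMN, List.take_succ_cons, List.sum_cons]
      have h1 := ih (s + x) k
      have h2 := min_le_right s (PMN (s + x) xs)
      linarith

theorem PMX_attained (l : List Int) : ∀ s : Int, ∃ k ≤ l.length, PMX s l = s + (l.take k).sum := by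
  induction l with
  | nil => intro s; exact ⟨0, by simp, by simp [PMX]⟩
  | cons x xs ih =>
    intro s
    obtain ⟨k, hk, he⟩ := ih (s + x)
    by_cases h : PMX (s + x) xs ≤ s
    · exact ⟨0, by simp, by simp [PMX, max_eq_left h]⟩
    · refine ⟨k + 1, by simpa using hk, ?_⟩
      simp only [PMX, List.take_succ_cons, List.sum_cons]
      rw [max_eq_right (le_of_not_ge h)]
      omega

theorem PMN_attained (l : List Int) : ∀ s : Int, ∃ k ≤ l.length, PMN s l = s + (l.take k).sum := by
  induction l with
  | nil => intro s; exact ⟨0, by simp, by simp [PMN]⟩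
  | cons x xs ih =>
    intro s
    obtain ⟨k, hk, he⟩ := ih (s + x)
    by_cases h : s ≤ PMN (s + x) xs
    · exact ⟨0, by simp, by simp [PMN, min_eq_left h]⟩
    · refine ⟨k + 1, by simpa using hk, ?_⟩
      simp only [PMN, List.take_succ_cons, List.sum_cons]
      rw [min_eq_right (le_of_not_ge h)]
      omega

theorem msign_length (l : List Int) : ∀ sg, (msign sg l).length = l.length := by
  induction l with
  | nil => intro sg; simp [msign]
  | cons x xs ih => intro sg; simp [msign, ih]

theorem msign_sum (l : List Int) : ∀ sg, (msign sg l).sum = sg * asum l := by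
  induction l with
  | nil => intro sg; simp [msign, asum]
  | cons x xs ih => intro sg; simp [msign, asum, ih]; ring

theorem msign_take (l : List Int) : ∀ sg (m : Nat), (msign sg l).take m = msign sg (l.take m) := by
  induction l with
  | nil => intro sg m; simp [msign]
  | cons x xs ih =>
    intro sg m
    cases m with
    | zero => simp [msign]
    | succ m => simp [msign, ih]

theorem msign_drop (j : Nat) : ∀ (l : List Int) sg, (msign sg l).drop j = msign (sg * (-1) ^ j) (l.drop j) := by
  induction j with
  | zero => intro l sg; simp
  | succ j ih =>
    intro l sg
    cases l with
    | nil => simp [msign]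
    | cons x xs =>
      have : sg * (-1) ^ (j + 1) = -sg * (-1) ^ j := by ring
      rw [this]
      simpa [msign] using ih xs (-sg)

-- B's fold, characterised by PMX/PMN
theorem foldB (l : List Int) : ∀ (s mx mn sg : Int), s ≤ mx → mn ≤ s →
    l.foldl
      (fun (st : Int × Int × Int × Int) x =>
        let s := st.1 + st.2.2.2 * x
        (s, max st.2.1 s, min st.2.2.1 s, -st.2.2.2))
      (s, mx, mn, sg)
    = (s + (msign sg l).sum, max mx (PMX s (msign sg l)), min mn (PMN s (msign sg l)),
       (-1) ^ l.length * sg) := by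
  induction l with
  | nil =>
    intro s mx mn sg hmx hmn
    simp [msign, PMX, PMN, max_eq_left hmx, min_eq_left hmn]
  | cons x xs ih =>
    intro s mx mn sg hmx hmn
    simp only [List.foldl_cons]
    rw [ih (s + sg * x) (max mx (s + sg * x)) (min mn (s + sg * x)) (-sg)
        (le_max_right _ _) (min_le_right _ _)]
    have h1 := le_PMX (msign (-sg) xs) (s + sg * x)
    have h2 := PMN_le (msign (-sg) xs) (s + sg * x)
    simp only [msign, PMX, PMN, List.sum_cons, List.length_cons, Prod.mk.injEq]
    refine ⟨by ring, by omega, by omega, by ring⟩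

theorem solution_alt_eq (a : List Int) :
    solution_alt a = PMX 0 (msign 1 a) - PMN 0 (msign 1 a) := by
  unfold solution_alt
  rw [foldB a 0 0 0 1 le_rfl le_rfl]
  have h1 := le_PMX (msign 1 a) 0
  have h2 := PMN_le (msign 1 a) 0
  simp only [max_eq_right h1, min_eq_right h2]

-- A's inner enumerate-fold computes (p + (-1)^k * asum, m - (-1)^k * asum)
theorem inner_fold (purse : List Int) : ∀ (k : Nat) (p m : Int),
    (PySem.List.enumerate purse (k : Int)).foldl
      (fun (pm : Int × Int) (q : Int × Int) =>
        (pm.1 + (-1) ^ q.1.toNat * q.2, pm.2 + (-1) ^ (q.1 + 1).toNat * q.2))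
      (p, m)
    = (p + (-1) ^ k * asum purse, m + (-1) ^ (k + 1) * asum purse) := by
  induction purse with
  | nil => intro k p m; simp [PySem.List.enumerate, asum]
  | cons x xs ih =>
    intro k p m
    rw [PySem.List.enumerate_cons]
    have hc : ((k : Int) + 1) = ((k + 1 : Nat) : Int) := by push_cast; ring
    simp only [List.foldl_cons, hc, Int.toNat_natCast]
    rw [ih (k + 1)]
    simp only [asum, Prod.mk.injEq, pow_succ]
    constructor <;> ring

-- prefix sums of the alternating-signed sequence, and the per-window value
def Sb (a : List Int) (k : Nat) : Int := ((msign 1 a).take k).sum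

def segval (a : List Int) (j m : Nat) : Int :=
  max (Sb a (j + m) - Sb a j) (-(Sb a (j + m) - Sb a j))

theorem seg_asum (a : List Int) (j m : Nat) :
    (-1 : Int) ^ j * asum ((a.drop j).take m) = Sb a (j + m) - Sb a j := by
  have h2 : (msign 1 a).drop j = msign ((-1) ^ j) (a.drop j) := by
    simpa using msign_drop j a 1
  have h3 : (List.take m (msign ((-1 : Int) ^ j) (a.drop j))).sum
      = (-1 : Int) ^ j * asum ((a.drop j).take m) := by
    rw [msign_take, msign_sum]
  unfold Sb
  rw [List.take_add, List.sum_append, h2, h3]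
  ring

theorem body_eq (a : List Int) (L s : Int) (h0 : 0 ≤ s) (hL : 0 ≤ L) :
    (let purse := PySem.List.slice a (some s) (some (s + L))
     let pm := (PySem.List.enumerate purse 0).foldl
        (fun (pm : Int × Int) (p : Int × Int) =>
          (pm.1 + (-1) ^ p.1.toNat * p.2, pm.2 + (-1) ^ (p.1 + 1).toNat * p.2)) ((0 : Int), (0 : Int))
     if pm.1 > pm.2 then pm.1 else pm.2)
    = segval a s.toNat L.toNat := by
  have hslice : PySem.List.slice a (some s) (some (s + L)) = (a.drop s.toNat).take L.toNat := by
    rw [PySem.List.slice_toNat a h0 (by omega)]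
    congr 1
    omega
  have hpm := inner_fold ((a.drop s.toNat).take L.toNat) 0 0 0
  simp only [Nat.cast_zero] at hpm
  simp only [hslice, hpm, pow_zero, pow_one, one_mul, zero_add, neg_one_mul]
  have hseg := seg_asum a s.toNat L.toNat
  unfold segval
  rcases Nat.even_or_odd s.toNat with he | ho
  · rw [Even.neg_one_pow he, one_mul] at hseg
    split_ifs <;> omega
  · rw [Odd.neg_one_pow ho, neg_one_mul] at hseg
    split_ifs <;> omega

theorem calc_eq (a : List Int) (L : Int) (hL : 0 ≤ L) :
    solutionCalc L a =
      (PySem.List.max? ((PySem.List.pyRange 0 (PySem.List.len a - L + 1) 1).map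
        (fun s => segval a s.toNat L.toNat)) (fun y => y)).getD 0 := by
  simp only [solutionCalc]
  rw [PySem.List.foldl_append_singleton_eq_map, List.nil_append]
  exact congrArg (fun l => (PySem.List.max? l (fun y => y)).getD 0)
    (List.map_congr_left (fun s hs => by
      rw [PySem.List.mem_pyRange_one] at hs
      exact body_eq a L s hs.1 hL))

theorem calc_le (a : List Int) (L : Int) (hL1 : 1 ≤ L) :
    solutionCalc L a ≤ PMX 0 (msign 1 a) - PMN 0 (msign 1 a) := by
  rw [calc_eq a L (by omega)]
  have hP := le_PMX (msign 1 a) 0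
  have hN := PMN_le (msign 1 a) 0
  cases hmax : PySem.List.max? ((PySem.List.pyRange 0 (PySem.List.len a - L + 1) 1).map
      (fun s => segval a s.toNat L.toNat)) (fun y => y) with
  | none => simp only [Option.getD_none]; omega
  | some m =>
    simp only [Option.getD_some]
    have hm := PySem.List.max?_mem hmax
    obtain ⟨s, hs, hv⟩ := List.mem_map.mp hm
    have h1 := prefix_le_PMX (msign 1 a) 0 (s.toNat + L.toNat)
    have h2 := PMN_le_prefix (msign 1 a) 0 s.toNat
    have h3 := prefix_le_PMX (msign 1 a) 0 s.toNat
    have h4 := PMN_le_prefix (msign 1 a) 0 (s.toNat + L.toNat)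
    rw [← hv]
    unfold segval Sb
    omega

theorem calc_ge (a : List Int) (L : Int) (s : Int) (hL : 0 ≤ L)
    (hs : s ∈ PySem.List.pyRange 0 (PySem.List.len a - L + 1) 1) :
    segval a s.toNat L.toNat ≤ solutionCalc L a := by
  rw [calc_eq a L hL]
  have hmem := List.mem_map_of_mem (f := fun s : Int => segval a s.toNat L.toNat) hs
  cases hmax : PySem.List.max? ((PySem.List.pyRange 0 (PySem.List.len a - L + 1) 1).map
      (fun s => segval a s.toNat L.toNat)) (fun y => y) with
  | none =>
    rw [PySem.List.max?_eq_none_iff] at hmax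
    rw [hmax] at hmem
    exact absurd hmem (List.not_mem_nil)
  | some m =>
    simp only [Option.getD_some]
    exact PySem.List.max?_isMax hmax _ hmem

theorem foldl_max_le (l : List Int) (f : Int → Int) :
    ∀ (init c : Int), init ≤ c → (∀ x ∈ l, f x ≤ c) →
      l.foldl (fun acc x => max acc (f x)) init ≤ c := by
  induction l with
  | nil => intro init c h _; simpa using h
  | cons x xs ih =>
    intro init c h hall
    simp only [List.foldl_cons]
    exact ih _ c (by have := hall x (by simp); omega) (fun y hy => hall y (by simp [hy]))

theorem solution_eq (a : List Int) :
    solution a = PMX 0 (msign 1 a) - PMN 0 (msign 1 a) := by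
  have hstep : (fun (mv i : Int) => if mv < solutionCalc i a then solutionCalc i a else mv)
      = fun mv i => max mv (solutionCalc i a) := by
    funext mv i; split_ifs <;> omega
  simp only [solution, PySem.List.len_eq]
  rw [hstep]
  have hblen : (msign 1 a).length = a.length := msign_length a 1
  apply le_antisymm
  · apply foldl_max_le
    · have := le_PMX (msign 1 a) 0
      have := PMN_le (msign 1 a) 0
      omega
    · intro L hL
      rw [PySem.List.mem_pyRange_one] at hL
      exact calc_le a L hL.1
  · obtain ⟨i, hi, hPi⟩ := PMX_attained (msign 1 a) 0
    obtain ⟨j, hj, hNj⟩ := PMN_attained (msign 1 a) 0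
    by_cases hij : i = j
    · have h0 : PMX 0 (msign 1 a) - PMN 0 (msign 1 a) = 0 := by subst hij; omega
      rw [h0]
      exact (PySem.List.le_foldl_max_int _ (fun i => solutionCalc i a) 0).1
    · have hjm : min i j < max i j := by omega
      set L : Int := (max i j : Int) - (min i j : Int) with hLdef
      have hL1 : 1 ≤ L := by omega
      have hLn : L ≤ (a.length : Int) := by
        have : max i j ≤ a.length := by omega
        omega
      have htoNat : L.toNat = max i j - min i j := by omega
      have hmem : ((min i j : Nat) : Int) ∈ PySem.List.pyRange 0 ((a.length : Int) - L + 1) 1 := by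
        rw [PySem.List.mem_pyRange_one]
        constructor
        · omega
        · have : max i j ≤ a.length := by omega
          omega
      have hge := calc_ge a L ((min i j : Nat) : Int) (by omega) (by simpa using hmem)
      have hLmem : L ∈ PySem.List.pyRange 1 ((a.length : Int) + 1) 1 := by
        rw [PySem.List.mem_pyRange_one]; omega
      have hfold := (PySem.List.le_foldl_max_int (PySem.List.pyRange 1 ((a.length : Int) + 1) 1)
        (fun i => solutionCalc i a) 0).2 L hLmem
      have hsv : PMX 0 (msign 1 a) - PMN 0 (msign 1 a) ≤ segval a (min i j) (max i j - min i j) := by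
        unfold segval Sb
        have hplus : min i j + (max i j - min i j) = max i j := by omega
        rw [hplus]
        rcases le_total i j with h | h
        · rw [min_eq_left h, max_eq_right h]; omega
        · rw [min_eq_right h, max_eq_left h]; omega
      have hcast : ((min i j : Nat) : Int).toNat = min i j := Int.toNat_natCast _
      rw [hcast, htoNat] at hge
      omega


-- ===== VERDICT (by name: the statement is the Claim_ definition above) =====
theorem solution_spec : Claim_equal_solution := by
  intro a _
  unfold Spec_solution
  rw [solution_eq, solution_alt_eq]
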